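-- pv_equiv track=rewrite | github.com/christophmeissner/advent_of_code_2023.py | day07/solve.py | hand_order
-- ===== SOURCE A (Python) =====
-- from collections import Counter
--
-- def hand_order(hand, jokers=False):
--     card_order = jokers and "J23456789TQKA" or "23456789TJQKA"
--     counter = Counter(hand)
--     if jokers and "J" in counter:
--         joker_count = counter.pop("J")
--         if counter:
--             items = sorted(
--                 counter.items(),
--                 key=lambda card: (card[1], card_order.index(card[0])),
--                 reverse=True,
--             )
--             most_common_card = items[0][0]
--         else:
--             # when hand == "JJJJJ", counter will have no more cards after popping
--             most_common_card = card_order[-1]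
--         counter[most_common_card] += joker_count
--     return sorted(counter.values(), reverse=True) + [card_order.index(c) for c in hand]
-- ===== SOURCE B (Python) =====
-- def hand_order(hand, jokers=False):
--     card_order = "J23456789TQKA" if jokers else "23456789TJQKA"
--     rank = {c: i for i, c in enumerate(card_order)}
--     relevant = [c for c in hand if not (jokers and c == "J")]
--     # run-length encode the sorted relevant cards: equal cards are adjacent,
--     # so the run lengths are exactly the per-card counts.
--     runs = []
--     prev = None
--     for c in sorted(relevant):
--         if c == prev:
--             runs[0] += 1
--         else:
--             runs.insert(0, 1)
--         prev = c
--     runs.sort(reverse=True)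
--     if jokers and len(relevant) < len(hand):
--         jc = len(hand) - len(relevant)
--         runs = [runs[0] + jc] + runs[1:] if runs else [jc]
--     return runs + [rank[c] for c in hand]
-- ===== Notes on version B (the rewrite author's own statement) =====
-- stated objective: alternative
-- what changed: B derives the hand-type counts by sorting the non-joker cards and run-length encoding the sorted list (then sorting the run lengths and adding the joker count, obtained arithmetically as len(hand)-len(relevant), to the largest), and reads rank indices from a dict built once from enumerate(card_order); A's Counter, most-common-card selection with a tie-breaking sort, and Counter mutation disappear.
import Mathlib
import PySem

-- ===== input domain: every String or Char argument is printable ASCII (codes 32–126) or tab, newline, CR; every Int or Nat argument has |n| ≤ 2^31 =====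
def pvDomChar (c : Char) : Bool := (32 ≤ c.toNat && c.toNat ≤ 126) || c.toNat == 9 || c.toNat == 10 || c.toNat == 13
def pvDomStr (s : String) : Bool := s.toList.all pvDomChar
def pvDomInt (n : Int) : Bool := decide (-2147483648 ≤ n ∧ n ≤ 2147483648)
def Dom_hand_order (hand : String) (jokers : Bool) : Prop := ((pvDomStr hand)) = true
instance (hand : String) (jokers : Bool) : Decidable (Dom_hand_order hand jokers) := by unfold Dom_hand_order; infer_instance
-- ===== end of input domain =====

-- B computes the hand-type counts by sorting the (non-joker) cards and run-length
-- encoding the sorted list, then sorting the run lengths, bumping the largest by the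
-- joker count arithmetically, and reading the rank indices from a dict built once
-- from enumerate(card_order) — no Counter, no most-common-card selection; objective: alternative.

-- ===== PORT A =====
-- Counter(hand) is PySem.Dict.counter; counter.pop("J") is getD + erase (the key is
-- present by the preceding `contains` check, so pop cannot raise); `if counter:` is
-- `size ≠ 0`; card_order[-1] is pyGet? at -1, `some` on this nonempty literal, read
-- off with getD; str.index is PySem.Str.find (equal wherever index does not raise,
-- which Pre_ guarantees for every character the code looks up).
def hand_order (hand : String) (jokers : Bool) : List Int :=
  let card_order : String := if jokers then "J23456789TQKA" else "23456789TJQKA"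
  let counter := PySem.Dict.counter hand.toList
  let counter :=
    if jokers && counter.contains 'J' then
      let joker_count := counter.getD 'J' 0
      let counter := counter.erase 'J'
      let most_common_card :=
        if counter.size ≠ 0 then
          (PySem.List.sorted2 counter.items (fun p => p.2)
            (fun p => PySem.Str.find card_order (String.ofList [p.1])) true).headI.1
        else
          (PySem.Str.pyGet? card_order (-1)).getD ' '
      counter.modify most_common_card 0 (· + joker_count)
    else counter
  PySem.List.sorted counter.values (fun v => v) true
    ++ hand.toList.map (fun c => PySem.Str.find card_order (String.ofList [c]))

-- ===== PORT B =====
-- One step of Source B's run-length loop over the ascending-sorted cards: `prev` is the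
-- Option in the state (None at the start); `runs[0] += 1` / `runs.insert(0, 1)` act on
-- the head of the runs list.  The `[]` branch of the match is unreachable (runs is
-- nonempty whenever prev is `some`); Python would raise IndexError there.
def rleStep (st : List Int × Option Char) (c : Char) : List Int × Option Char :=
  if some c == st.2 then
    (match st.1 with
     | r :: t => (r + 1) :: t
     | [] => [], some c)
  else (1 :: st.1, some c)

-- `rank = {c: i for i, c in enumerate(card_order)}`
def rankDict (co : List Char) : PySem.Dict Char Int :=
  (PySem.List.enumerate co 0).foldl (fun d p => d.insert p.2 p.1) PySem.Dict.empty

-- `len(...)` is ported as List.length of the underlying character list (exact);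
-- `rank[c]` is get?/getD (KeyError is excluded by Pre_, so the default is never read).
def hand_order_alt (hand : String) (jokers : Bool) : List Int :=
  let card_order : String := if jokers then "J23456789TQKA" else "23456789TJQKA"
  let rank := rankDict card_order.toList
  let relevant : List Char := hand.toList.filter (fun c => !(jokers && c == 'J'))
  let runs0 := ((PySem.List.sorted relevant (fun c => c) false).foldl rleStep ([], none)).1
  let runs := PySem.List.sorted runs0 (fun v => v) true
  let runs :=
    if jokers && decide (relevant.length < hand.toList.length) then
      let jc : Int := (hand.toList.length : Int) - (relevant.length : Int)
      match runs with
      | [] => [jc]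
      | r :: t => (r + jc) :: t
    else runs
  runs ++ hand.toList.map (fun c => ((rank.get? c).getD 0))

-- ===== PRECONDITION & SPEC =====
-- Pre_ excludes exactly the hands containing a character that is not one of the 13
-- card characters: on those Python A raises ValueError at card_order.index(c)
-- (and Python B raises KeyError at rank[c]).
def Pre_hand_order (hand : String) (jokers : Bool) : Prop :=
  (hand.toList.all (fun c =>
    (['2','3','4','5','6','7','8','9','T','J','Q','K','A'] : List Char).contains c)) = true
instance (hand : String) (jokers : Bool) : Decidable (Pre_hand_order hand jokers) := by
  unfold Pre_hand_order; infer_instance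
def pvWitness_hand_order : String × Bool := ("32T3K", false)
def Spec_hand_order (hand : String) (jokers : Bool) (out : List Int) : Prop :=
  out = hand_order_alt hand jokers
instance (hand : String) (jokers : Bool) (out : List Int) : Decidable (Spec_hand_order hand jokers out) := by
  unfold Spec_hand_order; infer_instance

-- ===== CLAIM (what is proved, stated in full; the proofs are below) =====
def Claim_equal_hand_order : Prop := ∀ (hand : String) (jokers : Bool), Dom_hand_order hand jokers → Pre_hand_order hand jokers → Spec_hand_order hand jokers (hand_order hand jokers)

-- ===== LEMMAS AND PROOFS =====

-- insertBy with a comparator that is decided by the first key (up to ties) preserves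
-- "descending in the first key"
lemma insertBy_pairwise_fst {α : Type} (k1 : α → Int) (before : α → α → Bool)
    (hT : ∀ a b, before a b = true → k1 b ≤ k1 a)
    (hF : ∀ a b, before a b = false → k1 a ≤ k1 b)
    (x : α) : ∀ ys : List α, ys.Pairwise (fun a b => k1 b ≤ k1 a) →
    (PySem.List.insertBy before x ys).Pairwise (fun a b => k1 b ≤ k1 a) := by
  intro ys
  induction ys with
  | nil => intro _; simp [PySem.List.insertBy]
  | cons y ys ih =>
    intro hp
    rw [List.pairwise_cons] at hp
    obtain ⟨hy, hys⟩ := hp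
    by_cases hb : before x y = true
    · simp only [PySem.List.insertBy, hb, if_pos]
      refine List.Pairwise.cons ?_ (List.Pairwise.cons hy hys)
      intro z hz
      rcases List.mem_cons.1 hz with rfl | hz
      · exact hT _ _ hb
      · exact le_trans (hy z hz) (hT _ _ hb)
    · have hb' : before x y = false := by simpa using hb
      simp only [PySem.List.insertBy, hb', Bool.false_eq_true, if_neg, not_false_iff]
      refine List.Pairwise.cons ?_ (ih hys)
      intro z hz
      rcases (PySem.List.insertBy_mem_iff before x z ys).1 hz with rfl | hz
      · exact hF _ _ hb'
      · exact hy z hz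

lemma foldl_insertBy_pairwise_fst {α : Type} (k1 : α → Int) (before : α → α → Bool)
    (hT : ∀ a b, before a b = true → k1 b ≤ k1 a)
    (hF : ∀ a b, before a b = false → k1 a ≤ k1 b) :
    ∀ (xs acc : List α), acc.Pairwise (fun a b => k1 b ≤ k1 a) →
    (xs.foldl (fun acc x => PySem.List.insertBy before x acc) acc).Pairwise
      (fun a b => k1 b ≤ k1 a) := by
  intro xs
  induction xs with
  | nil => intro acc h; simpa using h
  | cons x xs ih =>
    intro acc h
    exact ih _ (insertBy_pairwise_fst k1 before hT hF x acc h)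

-- sorted2 with reverse=True is descending in its first key
lemma sorted2_rev_pairwise_fst {α : Type} (k1 k2 : α → Int) (xs : List α) :
    (PySem.List.sorted2 xs k1 k2 true).Pairwise (fun a b => k1 b ≤ k1 a) := by
  simp only [PySem.List.sorted2, if_pos]
  apply foldl_insertBy_pairwise_fst
  · intro a b h
    simp only [Bool.or_eq_true, Bool.and_eq_true, decide_eq_true_eq, Bool.not_eq_true',
      decide_eq_false_iff_not] at h
    rcases h with h | ⟨h, _⟩
    · exact le_of_lt h
    · exact not_lt.1 h
  · intro a b h
    simp only [Bool.or_eq_false_iff, Bool.and_eq_false_iff, decide_eq_false_iff_not,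
      Bool.not_eq_false', decide_eq_true_eq] at h
    exact not_lt.1 h.1
  · exact List.Pairwise.nil

-- the first element of sorted2 (reverse=True) maximises the first key
lemma sorted2_rev_head_max {α : Type} (k1 k2 : α → Int) (xs : List α) {m : α} {t : List α}
    (h : PySem.List.sorted2 xs k1 k2 true = m :: t) :
    ∀ y ∈ xs, k1 y ≤ k1 m := by
  intro y hy
  have hmem : y ∈ PySem.List.sorted2 xs k1 k2 true :=
    (PySem.List.sorted2_perm xs k1 k2 true).mem_iff.2 hy
  rw [h] at hmem
  rcases List.mem_cons.1 hmem with rfl | hmt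
  · exact le_rfl
  · have hp := sorted2_rev_pairwise_fst k1 k2 xs
    rw [h, List.pairwise_cons] at hp
    exact hp.1 y hmt

-- sorted(xs, reverse=True) of ints is the unique descending rearrangement of xs
lemma sorted_rev_int_eq {xs ys : List Int} (hp : ys.Perm xs)
    (hs : ys.Pairwise (fun a b => b ≤ a)) :
    PySem.List.sorted xs (fun v => v) true = ys :=
  List.Perm.eq_of_pairwise (le := fun a b => b ≤ a)
    (fun _ _ _ _ h1 h2 => le_antisymm h2 h1)
    (by simpa using PySem.List.sorted_pairwise_rev xs (fun v => v))
    hs ((PySem.List.sorted_perm xs _ true).trans hp.symm)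

-- descending sort only sees the multiset of its argument
lemma sorted_rev_int_congr_perm {xs ys : List Int} (h : xs.Perm ys) :
    PySem.List.sorted xs (fun v => v) true = PySem.List.sorted ys (fun v => v) true :=
  sorted_rev_int_eq ((PySem.List.sorted_perm ys (fun v => v) true).trans h.symm)
    (by simpa using PySem.List.sorted_pairwise_rev ys (fun v => v))

-- all-joker hand: A bumps card_order[-1] in the emptied counter, B returns [joker_count]
lemma counts_eq_nil (cs : List Char) (idx : Char → Int)
    (hK : (PySem.Set.ofList cs).filter (fun c => !(c == 'J')) = []) :
    PySem.List.sorted ((PySem.Dict.counter cs |>.erase 'J').modify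
        (if (PySem.Dict.counter cs |>.erase 'J').size ≠ 0 then
          (PySem.List.sorted2 (PySem.Dict.counter cs |>.erase 'J').items (fun p => p.2)
            (fun p => idx p.1) true).headI.1
        else 'A') 0 (· + (cs.count 'J' : Int))).values (fun v => v) true
    = [(cs.count 'J' : Int)] := by
  have hitems : (PySem.Dict.counter cs |>.erase 'J').items
      = ((PySem.Set.ofList cs).filter (fun c => !(c == 'J'))).map
          (fun k => (k, (cs.count k : Int))) := by
    simp [PySem.Dict.erase, PySem.Dict.items_counter, List.filter_map, Function.comp_def]
  have hc1 : (PySem.Dict.counter cs |>.erase 'J') = PySem.Dict.empty :=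
    PySem.Dict.ext (by rw [hitems, hK]; rfl)
  rw [hc1]
  have h1 : (PySem.Dict.empty (κ := Char) (ν := Int)).size = 0 := rfl
  simp only [h1, ne_eq, not_true_eq_false, if_false]
  simp only [PySem.Dict.modify, PySem.Dict.getD_empty]
  simp only [PySem.Dict.values]
  rw [PySem.Dict.items_insert_of_not_contains _ _ (by rfl)]
  simp only [PySem.Dict.empty, List.map_nil, List.map_cons, List.nil_append]
  rw [sorted_rev_int_eq (List.Perm.refl _) (by simp)]
  simp

-- main case: some non-joker card exists; bumping the chosen most-common card's count
-- equals bumping the head of the descending count list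
lemma counts_eq_cons (cs : List Char) (idx : Char → Int) {w0 : Int} {t : List Int}
    (hw : PySem.List.sorted (((PySem.Set.ofList cs).filter (fun c => !(c == 'J'))).map
          (fun c => (cs.count c : Int))) (fun v => v) true = w0 :: t) :
    PySem.List.sorted ((PySem.Dict.counter cs |>.erase 'J').modify
        (if (PySem.Dict.counter cs |>.erase 'J').size ≠ 0 then
          (PySem.List.sorted2 (PySem.Dict.counter cs |>.erase 'J').items (fun p => p.2)
            (fun p => idx p.1) true).headI.1
        else 'A') 0 (· + (cs.count 'J' : Int))).values (fun v => v) true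
    = (w0 + (cs.count 'J' : Int)) :: t := by
  have hitems : (PySem.Dict.counter cs |>.erase 'J').items
      = ((PySem.Set.ofList cs).filter (fun c => !(c == 'J'))).map
          (fun k => (k, (cs.count k : Int))) := by
    simp [PySem.Dict.erase, PySem.Dict.items_counter, List.filter_map, Function.comp_def]
  have hndK : ((PySem.Set.ofList cs).filter (fun c => !(c == 'J'))).Nodup :=
    (PySem.Set.nodup_ofList cs).filter _
  have hkeys : (PySem.Dict.counter cs |>.erase 'J').keys
      = (PySem.Set.ofList cs).filter (fun c => !(c == 'J')) := by
    simp [PySem.Dict.keys, hitems, Function.comp_def]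
  have hKne : (PySem.Set.ofList cs).filter (fun c => !(c == 'J')) ≠ [] := by
    intro hnil
    rw [hnil] at hw
    simp only [List.map_nil] at hw
    have h0 : ([] : List Int) = w0 :: t := hw
    exact List.cons_ne_nil w0 t h0.symm
  have hsize : (PySem.Dict.counter cs |>.erase 'J').size ≠ 0 := by
    simp only [PySem.Dict.size, hitems, List.length_map]
    intro h
    exact hKne (List.length_eq_zero_iff.mp h)
  rw [if_pos hsize]
  cases hs : PySem.List.sorted2 (PySem.Dict.counter cs |>.erase 'J').items
      (fun p => p.2) (fun p => idx p.1) true with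
  | nil =>
    exfalso
    have hperm := PySem.List.sorted2_perm (PySem.Dict.counter cs |>.erase 'J').items
      (fun p => p.2) (fun p => idx p.1) true
    rw [hs] at hperm
    have hnil := hperm.symm.eq_nil
    rw [hitems] at hnil
    exact hKne (by simpa using hnil)
  | cons m t' =>
    have hm_mem : m ∈ (PySem.Dict.counter cs |>.erase 'J').items := by
      have hmem : m ∈ PySem.List.sorted2 (PySem.Dict.counter cs |>.erase 'J').items
          (fun p => p.2) (fun p => idx p.1) true := by rw [hs]; exact List.mem_cons_self
      exact (PySem.List.sorted2_perm _ _ _ true).mem_iff.1 hmem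
    rw [hitems] at hm_mem
    obtain ⟨k, hkK, hkm⟩ := List.mem_map.1 hm_mem
    have hm1 : m.1 = k := by rw [← hkm]
    have hm2 : m.2 = (cs.count k : Int) := by rw [← hkm]
    simp only [List.headI]
    rw [hm1]
    have hcont : (PySem.Dict.counter cs |>.erase 'J').contains k = true := by
      rw [PySem.Dict.contains_iff_mem_keys, hkeys]
      exact hkK
    have hgetD : (PySem.Dict.counter cs |>.erase 'J').getD k 0 = (cs.count k : Int) :=
      PySem.Dict.getD_of_mem_items _ (hitems ▸ List.mem_map_of_mem hkK) (hkeys ▸ hndK) 0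
    have homax : ∀ k' ∈ (PySem.Set.ofList cs).filter (fun c => !(c == 'J')),
        (cs.count k' : Int) ≤ (cs.count k : Int) := by
      intro k' hk'
      have h := sorted2_rev_head_max (fun p => p.2) (fun p => idx p.1) _ hs
        (k', (cs.count k' : Int)) (by rw [hitems]; exact List.mem_map_of_mem hk')
      simp only at h
      rw [hm2] at h
      simpa using h
    simp only [PySem.Dict.modify, hgetD]
    simp only [PySem.Dict.values]
    rw [PySem.Dict.items_insert_of_contains _ _ hcont, hitems]
    obtain ⟨K1, K2, hsplit⟩ := List.append_of_mem hkK
    have hknotmem : k ∉ K1 ++ K2 := by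
      have h := hndK
      rw [hsplit, List.nodup_middle] at h
      exact (List.nodup_cons.1 h).1
    rw [hsplit] at hw homax ⊢
    have hK1ne : ∀ x ∈ K1, ¬(x = k) := by
      intro x hx hxk
      exact hknotmem (List.mem_append_left _ (hxk ▸ hx))
    have hK2ne : ∀ x ∈ K2, ¬(x = k) := by
      intro x hx hxk
      exact hknotmem (List.mem_append_right _ (hxk ▸ hx))
    have hval : List.map (fun x : Char × Int => x.2)
        (List.map (fun p : Char × Int => if (p.1 == k) = true then
            (k, (cs.count k : Int) + (cs.count 'J' : Int)) else p)
          (List.map (fun k' => (k', (cs.count k' : Int))) (K1 ++ k :: K2)))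
        = K1.map (fun c => (cs.count c : Int))
          ++ ((cs.count k : Int) + (cs.count 'J' : Int)) :: K2.map (fun c => (cs.count c : Int)) := by
      simp only [List.map_append, List.map_cons, List.map_map]
      refine congrArg₂ _ ?_ (congrArg₂ _ ?_ ?_)
      · exact List.map_congr_left (fun x hx => by simp [Function.comp_def, hK1ne x hx])
      · simp
      · exact List.map_congr_left (fun x hx => by simp [Function.comp_def, hK2ne x hx])
    rw [hval]
    rw [List.map_append, List.map_cons] at hw
    have hperm_w := PySem.List.sorted_perm
      (K1.map (fun c => (cs.count c : Int)) ++ (cs.count k : Int) :: K2.map (fun c => (cs.count c : Int)))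
      (fun v => v) true
    rw [hw] at hperm_w
    have homaxv : ∀ v ∈ K1.map (fun c => (cs.count c : Int))
        ++ (cs.count k : Int) :: K2.map (fun c => (cs.count c : Int)), v ≤ (cs.count k : Int) := by
      intro v hv
      rcases List.mem_append.1 hv with h1 | h2
      · obtain ⟨x, hx, rfl⟩ := List.mem_map.1 h1
        exact homax x (List.mem_append_left _ hx)
      · rcases List.mem_cons.1 h2 with rfl | h3
        · exact le_rfl
        · obtain ⟨x, hx, rfl⟩ := List.mem_map.1 h3
          exact homax x (List.mem_append_right _ (List.mem_cons_of_mem _ hx))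
    have hw0mem : w0 ∈ K1.map (fun c => (cs.count c : Int))
        ++ (cs.count k : Int) :: K2.map (fun c => (cs.count c : Int)) :=
      hperm_w.subset (by simp)
    have hw0max := PySem.List.key_head_sorted_rev_ge _ (fun v => v) hw
    have hw0 : w0 = (cs.count k : Int) :=
      le_antisymm (homaxv w0 hw0mem) (hw0max _ (by simp))
    have hpw := PySem.List.sorted_pairwise_rev
      (K1.map (fun c => (cs.count c : Int)) ++ (cs.count k : Int) :: K2.map (fun c => (cs.count c : Int)))
      (fun v => v)
    rw [hw, List.pairwise_cons] at hpw
    have hperm_t : t.Perm (K1.map (fun c => (cs.count c : Int)) ++ K2.map (fun c => (cs.count c : Int))) := by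
      have h1 := hperm_w.trans List.perm_middle
      rw [hw0] at h1
      exact h1.cons_inv
    refine sorted_rev_int_eq ?_ ?_
    · refine List.Perm.trans ?_ List.perm_middle.symm
      rw [hw0]
      exact hperm_t.cons _
    · refine List.Pairwise.cons ?_ hpw.2
      intro y hy
      have h1 : y ≤ w0 := hpw.1 y hy
      have h2 : (0:Int) ≤ (cs.count 'J' : Int) := Int.natCast_nonneg _
      linarith

-- ===== B-side lemmas: run-length encoding of a sorted list =====

-- the run-length loop only ever touches the head of `runs`: a deeper tail rides along
lemma rle_tail : ∀ (xs : List Char) (a : Int) (t : List Int) (p : Option Char),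
    (xs.foldl rleStep (a :: t, p)).1 = (xs.foldl rleStep ([a], p)).1 ++ t := by
  intro xs
  induction xs with
  | nil => intro a t p; simp
  | cons x xs ih =>
    intro a t p
    simp only [List.foldl_cons]
    by_cases h : (some x == p) = true
    · simp only [rleStep, h, if_pos]
      exact ih (a + 1) t (some x)
    · have h' : (some x == p) = false := by simpa using h
      simp only [rleStep, h', Bool.false_eq_true, if_neg, not_false_iff]
      rw [ih 1 (a :: t) (some x), ih 1 [a] (some x)]
      simp

-- invariant of the run-length loop on a sorted tail: the state ([j], some a) with a
-- minimal turns into the multiset {j + count a} ∪ {count c | c ≠ a distinct in s}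
lemma rle_perm_counts : ∀ (s : List Char), s.Pairwise (· ≤ ·) →
    ∀ (a : Char) (j : Int), (∀ x ∈ s, a ≤ x) →
    ∀ (K : List Char), K.Nodup → a ∉ K → (∀ x, x ∈ K ↔ x ∈ s ∧ x ≠ a) →
    ((s.foldl rleStep ([j], some a)).1).Perm
      ((j + (s.count a : Int)) :: K.map (fun c => (s.count c : Int))) := by
  intro s
  induction s with
  | nil =>
    intro _ a j _ K _ _ hK
    have hKnil : K = [] :=
      List.eq_nil_iff_forall_not_mem.2 (fun x hx => by simpa using ((hK x).1 hx).1)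
    subst hKnil
    simp
  | cons b t ih =>
    intro hs a j hle K hnd haK hK
    have hbt : ∀ x ∈ t, b ≤ x := (List.pairwise_cons.1 hs).1
    have hts : t.Pairwise (· ≤ ·) := (List.pairwise_cons.1 hs).2
    by_cases hba : b = a
    · subst hba
      have hstep : rleStep ([j], some b) b = ([j + 1], some b) := by simp [rleStep]
      simp only [List.foldl_cons, hstep]
      have hK' : ∀ x, x ∈ K ↔ x ∈ t ∧ x ≠ b := by
        intro x
        rw [hK x]
        constructor
        · rintro ⟨hm, hne⟩
          rcases List.mem_cons.1 hm with rfl | h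
          · exact absurd rfl hne
          · exact ⟨h, hne⟩
        · rintro ⟨hm, hne⟩
          exact ⟨List.mem_cons_of_mem _ hm, hne⟩
      have hIH := ih hts b (j + 1) hbt K hnd haK hK'
      have h1 : (j + 1) + (t.count b : Int) = j + ((b :: t).count b : Int) := by
        rw [List.count_cons_self]
        push_cast
        ring
      have h2 : K.map (fun c => (t.count c : Int)) = K.map (fun c => ((b :: t).count c : Int)) :=
        List.map_congr_left (fun x hx => by
          have hne := ((hK' x).1 hx).2
          simp [Ne.symm hne])
      rw [h1, h2] at hIH
      exact hIH
    · have hab : a < b := lt_of_le_of_ne (hle b List.mem_cons_self) (Ne.symm hba)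
      have hstep : rleStep ([j], some a) b = (1 :: [j], some b) := by
        simp [rleStep, hba]
      simp only [List.foldl_cons, hstep]
      rw [rle_tail t 1 [j] (some b)]
      have hbK : b ∈ K := (hK b).2 ⟨List.mem_cons_self, hba⟩
      have hndK' : (K.erase b).Nodup := hnd.erase _
      have hbK' : b ∉ K.erase b := fun h => ((List.Nodup.mem_erase_iff hnd).1 h).1 rfl
      have hK'mem : ∀ x, x ∈ K.erase b ↔ x ∈ t ∧ x ≠ b := by
        intro x
        rw [List.Nodup.mem_erase_iff hnd, hK x]
        constructor
        · rintro ⟨hxb, hxs, _⟩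
          rcases List.mem_cons.1 hxs with rfl | h
          · exact absurd rfl hxb
          · exact ⟨h, hxb⟩
        · rintro ⟨hxt, hxb⟩
          refine ⟨hxb, List.mem_cons_of_mem _ hxt, ?_⟩
          intro hxa
          exact absurd (hxa ▸ hbt x hxt) (not_le.2 hab)
      have hIH := ih hts b 1 hbt (K.erase b) hndK' hbK' hK'mem
      have hanotmem : a ∉ b :: t := by
        intro hmem
        rcases List.mem_cons.1 hmem with rfl | h
        · exact hba rfl
        · exact absurd (hbt a h) (not_le.2 hab)
      have hcount0 : (b :: t).count a = 0 := List.count_eq_zero.2 hanotmem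
      have hKperm : K.Perm (b :: K.erase b) := List.perm_cons_erase hbK
      have h3 : ((b :: t).count b : Int) = 1 + (t.count b : Int) := by
        rw [List.count_cons_self]; push_cast; ring
      have h4 : (K.erase b).map (fun c => ((b :: t).count c : Int))
          = (K.erase b).map (fun c => (t.count c : Int)) :=
        List.map_congr_left (fun x hx => by
          have hne := ((hK'mem x).1 hx).2
          simp [Ne.symm hne])
      have hmap : (K.map (fun c => ((b :: t).count c : Int))).Perm
          ((1 + (t.count b : Int)) :: (K.erase b).map (fun c => (t.count c : Int))) := by
        refine (hKperm.map _).trans ?_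
        simp only [List.map_cons]
        rw [h3, h4]
      have hLHS : ((t.foldl rleStep ([1], some b)).1 ++ [j]).Perm
          (j :: ((1 + (t.count b : Int)) :: (K.erase b).map (fun c => (t.count c : Int)))) :=
        (hIH.append_right [j]).trans (List.perm_append_singleton j _)
      have hj : j + (((b :: t).count a : Int)) = j := by rw [hcount0]; simp
      rw [hj]
      exact hLHS.trans (hmap.symm.cons j)

-- run lengths of a sorted list = the counts of its distinct elements, as a multiset
lemma rle_top (s : List Char) (hs : s.Pairwise (· ≤ ·)) (K : List Char) (hnd : K.Nodup)
    (hK : ∀ x, x ∈ K ↔ x ∈ s) :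
    ((s.foldl rleStep ([], none)).1).Perm (K.map (fun c => (s.count c : Int))) := by
  cases s with
  | nil =>
    have hKnil : K = [] :=
      List.eq_nil_iff_forall_not_mem.2 (fun x hx => by simpa using (hK x).1 hx)
    subst hKnil
    simp
  | cons b t =>
    have hbt : ∀ x ∈ t, b ≤ x := (List.pairwise_cons.1 hs).1
    have hts : t.Pairwise (· ≤ ·) := (List.pairwise_cons.1 hs).2
    have hstep : rleStep ([], none) b = ([1], some b) := by simp [rleStep]
    simp only [List.foldl_cons, hstep]
    have hbK : b ∈ K := (hK b).2 List.mem_cons_self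
    have hndK' : (K.erase b).Nodup := hnd.erase _
    have hbK' : b ∉ K.erase b := fun h => ((List.Nodup.mem_erase_iff hnd).1 h).1 rfl
    have hK'mem : ∀ x, x ∈ K.erase b ↔ x ∈ t ∧ x ≠ b := by
      intro x
      rw [List.Nodup.mem_erase_iff hnd, hK x]
      constructor
      · rintro ⟨hxb, hxs⟩
        rcases List.mem_cons.1 hxs with rfl | h
        · exact absurd rfl hxb
        · exact ⟨h, hxb⟩
      · rintro ⟨hxt, hxb⟩
        exact ⟨hxb, List.mem_cons_of_mem _ hxt⟩
    have hIH := rle_perm_counts t hts b 1 hbt (K.erase b) hndK' hbK' hK'mem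
    have hKperm : K.Perm (b :: K.erase b) := List.perm_cons_erase hbK
    have h3 : ((b :: t).count b : Int) = 1 + (t.count b : Int) := by
      rw [List.count_cons_self]; push_cast; ring
    have h4 : (K.erase b).map (fun c => ((b :: t).count c : Int))
        = (K.erase b).map (fun c => (t.count c : Int)) :=
      List.map_congr_left (fun x hx => by
        have hne := ((hK'mem x).1 hx).2
        simp [Ne.symm hne])
    have hmap : (K.map (fun c => ((b :: t).count c : Int))).Perm
        ((1 + (t.count b : Int)) :: (K.erase b).map (fun c => (t.count c : Int))) := by
      refine (hKperm.map _).trans ?_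
      simp only [List.map_cons]
      rw [h3, h4]
    exact hIH.trans hmap.symm

-- the whole B count pipeline: sort, RLE, sort descending = descending sort of
-- the counts of any duplicate-free enumeration of the elements
lemma runs_sorted_eq (l K : List Char) (hnd : K.Nodup) (hK : ∀ x, x ∈ K ↔ x ∈ l) :
    PySem.List.sorted (((PySem.List.sorted l (fun c => c) false).foldl rleStep ([], none)).1)
      (fun v => v) true
    = PySem.List.sorted (K.map (fun c => (l.count c : Int))) (fun v => v) true := by
  have hsp : (PySem.List.sorted l (fun c => c) false).Pairwise (· ≤ ·) := by
    simpa using PySem.List.sorted_pairwise l (fun c => c)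
  have hperm : (PySem.List.sorted l (fun c => c) false).Perm l :=
    PySem.List.sorted_perm l (fun c => c) false
  have h1 := rle_top (PySem.List.sorted l (fun c => c) false) hsp K hnd
    (fun x => (hK x).trans hperm.mem_iff.symm)
  have h2 : K.map (fun c => ((PySem.List.sorted l (fun c => c) false).count c : Int))
      = K.map (fun c => (l.count c : Int)) :=
    List.map_congr_left (fun x _ => by rw [hperm.count_eq])
  exact sorted_rev_int_congr_perm (h2 ▸ h1)

-- counts taken in the filtered list = counts taken in the original, over the filtered key set
lemma filtered_counts_perm (cs : List Char) :
    ((PySem.Set.ofList (cs.filter (fun c => !(c == 'J')))).map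
      (fun c => ((cs.filter (fun c => !(c == 'J'))).count c : Int))).Perm
    (((PySem.Set.ofList cs).filter (fun c => !(c == 'J'))).map
      (fun c => (cs.count c : Int))) := by
  have hnd0 : (PySem.Set.ofList (cs.filter (fun c => !(c == 'J')))).Nodup :=
    PySem.Set.nodup_ofList _
  have hndf : ((PySem.Set.ofList cs).filter (fun c => !(c == 'J'))).Nodup :=
    (PySem.Set.nodup_ofList cs).filter _
  have hmem : ∀ x, x ∈ PySem.Set.ofList (cs.filter (fun c => !(c == 'J')))
      ↔ x ∈ (PySem.Set.ofList cs).filter (fun c => !(c == 'J')) := by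
    intro x
    rw [PySem.Set.mem_ofList, List.mem_filter, List.mem_filter, PySem.Set.mem_ofList]
  have hperm : (PySem.Set.ofList (cs.filter (fun c => !(c == 'J')))).Perm
      ((PySem.Set.ofList cs).filter (fun c => !(c == 'J'))) :=
    (List.perm_ext_iff_of_nodup hnd0 hndf).2 hmem
  have hcong : (PySem.Set.ofList (cs.filter (fun c => !(c == 'J')))).map
      (fun c => ((cs.filter (fun c => !(c == 'J'))).count c : Int))
      = (PySem.Set.ofList (cs.filter (fun c => !(c == 'J')))).map
        (fun c => (cs.count c : Int)) := by
    refine List.map_congr_left (fun x hx => ?_)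
    have hxf : x ∈ cs.filter (fun c => !(c == 'J')) := (PySem.Set.mem_ofList _ _).1 hx
    have hpx : (!(x == 'J')) = true := (List.mem_filter.1 hxf).2
    simp [List.count_filter, hpx]
  rw [hcong]
  exact hperm.map _

-- the joker count read off arithmetically
lemma joker_count_arith (cs : List Char) :
    (cs.length : Int) - ((cs.filter (fun c => !(c == 'J'))).length : Int)
      = (cs.count 'J' : Int) := by
  have h1 : (cs.filter (fun c => !(c == 'J'))).length = cs.countP (fun c => !(c == 'J')) :=
    List.countP_eq_length_filter.symm
  have h2 : cs.length = cs.countP (fun c => !(c == 'J')) + cs.countP (fun c => ¬ !(c == 'J')) :=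
    cs.length_eq_countP_add_countP _
  have h3 : cs.countP (fun c => ¬ !(c == 'J')) = cs.countP (fun c => c == 'J') := by
    apply List.countP_congr
    intro c _
    by_cases h : c = 'J' <;> simp [h]
  have h4 : cs.countP (fun c => c == 'J') = cs.count 'J' := rfl
  omega

-- the rank dict agrees with str.index on the 13 card characters
lemma rank_eq_find (co : String) (hco : co = "J23456789TQKA" ∨ co = "23456789TJQKA")
    (c : Char) (hc : c ∈ (['2','3','4','5','6','7','8','9','T','J','Q','K','A'] : List Char)) :
    PySem.Str.find co (String.ofList [c]) = ((rankDict co.toList).get? c).getD 0 := by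
  rcases hco with rfl | rfl <;> fin_cases hc <;> decide

-- ===== VERDICT (by name: the statement is the Claim_ definition above) =====
theorem hand_order_spec : Claim_equal_hand_order := by
  intro hand jokers _ hpre
  show hand_order hand jokers = hand_order_alt hand jokers
  have hpre' : ∀ c ∈ hand.toList,
      c ∈ (['2','3','4','5','6','7','8','9','T','J','Q','K','A'] : List Char) := by
    intro c hc
    have h := List.all_eq_true.1 hpre c hc
    simpa using h
  simp only [hand_order, hand_order_alt]
  cases jokers with
  | false =>
    simp only [Bool.false_and, Bool.false_eq_true, if_false, Bool.not_false, List.filter_true]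
    congr 1
    · have hvals : (PySem.Dict.counter hand.toList).values
          = (PySem.Set.ofList hand.toList).map (fun k => (hand.toList.count k : Int)) := by
        simp [PySem.Dict.values, PySem.Dict.items_counter, List.map_map, Function.comp_def]
      rw [hvals, runs_sorted_eq hand.toList (PySem.Set.ofList hand.toList)
        (PySem.Set.nodup_ofList _) (fun x => PySem.Set.mem_ofList _ _)]
    · exact List.map_congr_left (fun c hc => rank_eq_find _ (Or.inr rfl) c (hpre' c hc))
  | true =>
    simp only [Bool.true_and, if_true]
    rw [PySem.Dict.contains_counter]
    by_cases hJ : 'J' ∈ hand.toList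
    · have hc : hand.toList.contains 'J' = true := by simpa using hJ
      rw [hc, if_pos rfl]
      have hlt : (hand.toList.filter (fun c => !(c == 'J'))).length < hand.toList.length := by
        rw [← List.countP_eq_length_filter]
        exact List.countP_lt_length_iff.2 ⟨'J', hJ, by simp⟩
      rw [if_pos (decide_eq_true hlt)]
      congr 1
      · rw [PySem.Dict.getD_counter]
        have hAcard : (PySem.Str.pyGet? "J23456789TQKA" (-1)).getD ' ' = 'A' := by decide
        rw [hAcard]
        have hBruns : PySem.List.sorted
            (((PySem.List.sorted (hand.toList.filter (fun c => !(c == 'J')))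
              (fun c => c) false).foldl rleStep ([], none)).1) (fun v => v) true
            = PySem.List.sorted (((PySem.Set.ofList hand.toList).filter
                (fun c => !(c == 'J'))).map (fun c => (hand.toList.count c : Int)))
              (fun v => v) true := by
          rw [runs_sorted_eq (hand.toList.filter (fun c => !(c == 'J')))
            (PySem.Set.ofList (hand.toList.filter (fun c => !(c == 'J'))))
            (PySem.Set.nodup_ofList _) (fun x => PySem.Set.mem_ofList _ _)]
          exact sorted_rev_int_congr_perm (filtered_counts_perm hand.toList)
        rw [hBruns, joker_count_arith hand.toList]
        cases hw : PySem.List.sorted (((PySem.Set.ofList hand.toList).filter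
            (fun c => !(c == 'J'))).map (fun c => (hand.toList.count c : Int)))
            (fun v => v) true with
        | nil =>
          have hK : (PySem.Set.ofList hand.toList).filter (fun c => !(c == 'J')) = [] := by
            have := (PySem.List.sorted_eq_nil_iff _ _ _).1 hw
            exact List.map_eq_nil_iff.1 this
          exact counts_eq_nil hand.toList
            (fun c => PySem.Str.find "J23456789TQKA" (String.ofList [c])) hK
        | cons w0 t =>
          exact counts_eq_cons hand.toList
            (fun c => PySem.Str.find "J23456789TQKA" (String.ofList [c])) hw
      · exact List.map_congr_left (fun c hc => rank_eq_find _ (Or.inl rfl) c (hpre' c hc))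
    · have hc : hand.toList.contains 'J' = false := by simpa using hJ
      rw [hc]
      simp only [Bool.false_eq_true, if_false]
      have hfe : hand.toList.filter (fun c => !(c == 'J')) = hand.toList :=
        List.filter_eq_self.2 (fun x hx => by
          simp only [Bool.not_eq_eq_eq_not, Bool.not_true, beq_eq_false_iff_ne, ne_eq]
          intro hxJ
          exact hJ (hxJ ▸ hx))
      rw [hfe, if_neg (by simp)]
      congr 1
      · have hvals : (PySem.Dict.counter hand.toList).values
            = (PySem.Set.ofList hand.toList).map (fun k => (hand.toList.count k : Int)) := by
          simp [PySem.Dict.values, PySem.Dict.items_counter, List.map_map, Function.comp_def]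
        rw [hvals, runs_sorted_eq hand.toList (PySem.Set.ofList hand.toList)
          (PySem.Set.nodup_ofList _) (fun x => PySem.Set.mem_ofList _ _)]
      · exact List.map_congr_left (fun c hc => rank_eq_find _ (Or.inl rfl) c (hpre' c hc))
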